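-- pv_equiv track=rewrite | github.com/HanlinW/WTGMatch | GroundTruthStat.py | Identify_Link
-- ===== SOURCE A (Python) =====
-- def Identify_Link(raw_list, i, last_dict, current_dict, current_type, last_timestamp):
-- 	link = {}
-- 	if "Widget" in current_dict:
-- 		# last_dict is not Mannul
-- 		link["Type"] = current_type
-- 		for k in current_dict:
-- 			if k == "TimeStamp":
-- 				link[k] = last_timestamp
-- 				last_timestamp = current_dict["TimeStamp"]
-- 			elif k == "Widget":
-- 				link[k] = current_dict[k]
-- 			elif k == "WidgetID":
-- 				link[k] = current_dict[k]
-- 			elif k == 'x':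
-- 				link[k] = current_dict[k]
-- 			elif k == 'y':
-- 				link[k] = current_dict[k]
-- 	else:
-- 		# last_dict is Mannul
-- 		link["Type"] = "Mannul"
-- 		for k in last_dict:
-- 			if k == "TimeStamp":
-- 				link[k] = last_timestamp
-- 				last_timestamp = current_dict["TimeStamp"]
--
-- 	return link,last_timestamp
-- ===== SOURCE B (Python) =====
-- KEEP = ("TimeStamp", "Widget", "WidgetID", "x", "y")
--
-- def _build(items, ts0):
-- 	# recursively turn the item list into the link's (key, value) pairs
-- 	if not items:
-- 		return []
-- 	(k, v), rest = items[0], items[1:]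
-- 	head = [(k, ts0 if k == "TimeStamp" else v)] if k in KEEP else []
-- 	return head + _build(rest, ts0)
--
-- def Identify_Link(raw_list, i, last_dict, current_dict, current_type, last_timestamp):
-- 	if "Widget" in current_dict:
-- 		link = dict([("Type", current_type)] + _build(list(current_dict.items()), last_timestamp))
-- 		return link, current_dict.get("TimeStamp", last_timestamp)
-- 	if "TimeStamp" in last_dict:
-- 		return {"Type": "Mannul", "TimeStamp": last_timestamp}, current_dict["TimeStamp"]
-- 	return {"Type": "Mannul"}, last_timestamp
-- ===== Notes on version B (the rewrite author's own statement) =====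
-- stated objective: alternative
-- what changed: B replaces A's imperative loop that mutates a dict and a loop-carried timestamp variable by a pure recursive function that assembles the link's (key,value) pair list back-to-front and builds the dict once from that list, with the returned timestamp obtained by a single direct .get lookup; the Mannul branch's loop over last_dict becomes one membership test and two dict literals.
import Mathlib
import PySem

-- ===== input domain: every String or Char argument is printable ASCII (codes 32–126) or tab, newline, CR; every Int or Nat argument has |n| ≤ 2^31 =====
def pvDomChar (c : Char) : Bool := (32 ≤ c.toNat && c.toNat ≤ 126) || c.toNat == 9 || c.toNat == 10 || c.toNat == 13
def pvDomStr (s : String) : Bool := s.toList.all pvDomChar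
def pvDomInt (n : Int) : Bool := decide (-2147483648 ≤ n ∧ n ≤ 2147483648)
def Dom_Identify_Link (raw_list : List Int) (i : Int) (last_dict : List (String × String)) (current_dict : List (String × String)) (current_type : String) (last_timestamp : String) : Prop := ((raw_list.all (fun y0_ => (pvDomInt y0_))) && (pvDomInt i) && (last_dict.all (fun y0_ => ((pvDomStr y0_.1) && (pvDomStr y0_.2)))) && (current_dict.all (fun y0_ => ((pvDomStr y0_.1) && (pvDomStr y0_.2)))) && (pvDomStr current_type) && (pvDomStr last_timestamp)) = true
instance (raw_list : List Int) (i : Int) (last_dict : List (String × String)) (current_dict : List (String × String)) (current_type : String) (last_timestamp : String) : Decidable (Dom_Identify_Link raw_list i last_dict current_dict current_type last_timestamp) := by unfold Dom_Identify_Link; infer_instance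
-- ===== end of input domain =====

-- B replaces A's dict-mutating loop with a loop-carried timestamp variable by a pure recursive
-- pair-list builder plus one dict construction and a direct .get lookup (objective: alternative).


-- ===== PORT A =====
-- literal transliteration of A; dict parameters become PySem.Dict via ofList; the loop bodies are
-- the named step functions below.  current_dict[k] for a k iterated from current_dict always hits,
-- so getD's default is never read in the Widget branch; the getD default in ilStepE is read exactly
-- where Python A raises KeyError (those inputs are excluded by Pre_ below).
def ilStepA (cd : PySem.Dict String String) (st : PySem.Dict String String × String) (k : String) : PySem.Dict String String × String :=
  if k == "TimeStamp" then (st.1.insert k st.2, cd.getD "TimeStamp" st.2)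
  else if k == "Widget" then (st.1.insert k (cd.getD k ""), st.2)
  else if k == "WidgetID" then (st.1.insert k (cd.getD k ""), st.2)
  else if k == "x" then (st.1.insert k (cd.getD k ""), st.2)
  else if k == "y" then (st.1.insert k (cd.getD k ""), st.2)
  else st

def ilStepE (cd : PySem.Dict String String) (st : PySem.Dict String String × String) (k : String) : PySem.Dict String String × String :=
  if k == "TimeStamp" then (st.1.insert k st.2, cd.getD "TimeStamp" st.2) else st

def Identify_Link (raw_list : List Int) (i : Int) (last_dict : List (String × String)) (current_dict : List (String × String)) (current_type : String) (last_timestamp : String) : (List (String × String)) × String :=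
  let cd : PySem.Dict String String := PySem.Dict.ofList current_dict
  if cd.contains "Widget" then
    let st := cd.keys.foldl (ilStepA cd) (PySem.Dict.empty.insert "Type" current_type, last_timestamp)
    (st.1.items, st.2)
  else
    let st := (PySem.Dict.ofList last_dict).keys.foldl (ilStepE cd) (PySem.Dict.empty.insert "Type" "Mannul", last_timestamp)
    (st.1.items, st.2)

-- ===== PORT B =====
-- literal transliteration of Source B: _build recursively assembles the pair list, dict() is built once
-- from it; the Mannul branch uses one membership test and dict literals.
def ilKeep (k : String) : Bool :=
  k == "TimeStamp" || k == "Widget" || k == "WidgetID" || k == "x" || k == "y"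

def ilBuild : List (String × String) → String → List (String × String)
  | [], _ => []
  | (k, v) :: rest, ts0 =>
      (if ilKeep k then [(k, if k == "TimeStamp" then ts0 else v)] else []) ++ ilBuild rest ts0

def Identify_Link_alt (raw_list : List Int) (i : Int) (last_dict : List (String × String)) (current_dict : List (String × String)) (current_type : String) (last_timestamp : String) : (List (String × String)) × String :=
  let cd : PySem.Dict String String := PySem.Dict.ofList current_dict
  if cd.contains "Widget" then
    ((PySem.Dict.ofList (("Type", current_type) :: ilBuild cd.items last_timestamp)).items,
      cd.getD "TimeStamp" last_timestamp)
  else if (PySem.Dict.ofList last_dict).contains "TimeStamp" then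
    -- current_dict["TimeStamp"]: Source B raises exactly where A does (outside Pre_)
    ((PySem.Dict.ofList [("Type", "Mannul"), ("TimeStamp", last_timestamp)]).items,
      cd.getD "TimeStamp" last_timestamp)
  else
    ((PySem.Dict.ofList [("Type", "Mannul")]).items, last_timestamp)

-- ===== PRECONDITION & SPEC =====
-- Pre_ excludes exactly the inputs where Python A raises KeyError: current_dict without a "Widget"
-- key while last_dict has a "TimeStamp" key and current_dict does not (B raises there too).
def Pre_Identify_Link (raw_list : List Int) (i : Int) (last_dict : List (String × String)) (current_dict : List (String × String)) (current_type : String) (last_timestamp : String) : Prop :=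
  "Widget" ∈ current_dict.map Prod.fst ∨ "TimeStamp" ∉ last_dict.map Prod.fst ∨ "TimeStamp" ∈ current_dict.map Prod.fst
instance (raw_list : List Int) (i : Int) (last_dict : List (String × String)) (current_dict : List (String × String)) (current_type : String) (last_timestamp : String) : Decidable (Pre_Identify_Link raw_list i last_dict current_dict current_type last_timestamp) := by unfold Pre_Identify_Link; infer_instance

def pvWitness_Identify_Link : List Int × Int × (List (String × String)) × (List (String × String)) × String × String :=
  ([], 0, [("TimeStamp", "1")], [("Widget", "Btn"), ("TimeStamp", "2"), ("x", "3")], "Click", "0")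

def Spec_Identify_Link (raw_list : List Int) (i : Int) (last_dict : List (String × String)) (current_dict : List (String × String)) (current_type : String) (last_timestamp : String) (out : (List (String × String)) × String) : Prop := out = Identify_Link_alt raw_list i last_dict current_dict current_type last_timestamp
instance (raw_list : List Int) (i : Int) (last_dict : List (String × String)) (current_dict : List (String × String)) (current_type : String) (last_timestamp : String) (out : (List (String × String)) × String) : Decidable (Spec_Identify_Link raw_list i last_dict current_dict current_type last_timestamp out) := by unfold Spec_Identify_Link; infer_instance

-- ===== CLAIM (what is proved, stated in full; the proofs are below) =====
def Claim_equal_Identify_Link : Prop := ∀ (raw_list : List Int) (i : Int) (last_dict : List (String × String)) (current_dict : List (String × String)) (current_type : String) (last_timestamp : String), Dom_Identify_Link raw_list i last_dict current_dict current_type last_timestamp → Pre_Identify_Link raw_list i last_dict current_dict current_type last_timestamp → Spec_Identify_Link raw_list i last_dict current_dict current_type last_timestamp (Identify_Link raw_list i last_dict current_dict current_type last_timestamp)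

-- ===== LEMMAS AND PROOFS =====

theorem Identify_Link_witness_ok :
    Dom_Identify_Link pvWitness_Identify_Link.1 pvWitness_Identify_Link.2.1 pvWitness_Identify_Link.2.2.1 pvWitness_Identify_Link.2.2.2.1 pvWitness_Identify_Link.2.2.2.2.1 pvWitness_Identify_Link.2.2.2.2.2 ∧
    Pre_Identify_Link pvWitness_Identify_Link.1 pvWitness_Identify_Link.2.1 pvWitness_Identify_Link.2.2.1 pvWitness_Identify_Link.2.2.2.1 pvWitness_Identify_Link.2.2.2.2.1 pvWitness_Identify_Link.2.2.2.2.2 := by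
  decide

-- proof-only reformulation of A's Widget-branch loop body over (key, value) items
def ilStepItems (st : PySem.Dict String String × String) (p : String × String) : PySem.Dict String String × String :=
  if p.1 == "TimeStamp" then (st.1.insert p.1 st.2, p.2)
  else if ilKeep p.1 then (st.1.insert p.1 p.2, st.2)
  else st

-- proof-only: the dict-insertion step B's pair list corresponds to
def ilStepB (ts0 : String) (l : PySem.Dict String String) (p : String × String) : PySem.Dict String String :=
  l.insert p.1 (if p.1 == "TimeStamp" then ts0 else p.2)

-- the value Python's last_timestamp variable holds after A's Widget-branch loop
def ilTsAfter (its : List (String × String)) (ts : String) : String :=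
  match its.find? (fun p => p.1 == "TimeStamp") with
  | some p => p.2
  | none => ts

theorem ilfoldA_keys_items (d : PySem.Dict String String) (init : PySem.Dict String String × String)
    (h : d.keys.Nodup) :
    d.keys.foldl (ilStepA d) init = d.items.foldl ilStepItems init := by
  have hk : d.keys = d.items.map Prod.fst := rfl
  rw [hk, List.foldl_map]
  apply PySem.List.foldl_congr_mem
  intro st p hp
  obtain ⟨k, v⟩ := p
  have hget : ∀ d0, d.getD k d0 = v := PySem.Dict.getD_of_mem_items d hp h
  by_cases h1 : k = "TimeStamp"
  · subst h1; simp [ilStepA, ilStepItems, hget]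
  · by_cases h2 : k = "Widget"
    · subst h2; simp [ilStepA, ilStepItems, ilKeep, hget]
    · by_cases h3 : k = "WidgetID"
      · subst h3; simp [ilStepA, ilStepItems, ilKeep, hget]
      · by_cases h4 : k = "x"
        · subst h4; simp [ilStepA, ilStepItems, ilKeep, hget]
        · by_cases h5 : k = "y"
          · subst h5; simp [ilStepA, ilStepItems, ilKeep, hget]
          · simp [ilStepA, ilStepItems, ilKeep, h1, h2, h3, h4, h5]

theorem ilfold_items (its : List (String × String)) (link : PySem.Dict String String) (ts : String)
    (h : (its.map Prod.fst).count "TimeStamp" ≤ 1) :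
    its.foldl ilStepItems (link, ts)
      = ((its.filter (fun p => ilKeep p.1)).foldl (ilStepB ts) link, ilTsAfter its ts) := by
  induction its generalizing link ts with
  | nil => simp [ilTsAfter]
  | cons p rest ih =>
    obtain ⟨k, v⟩ := p
    by_cases h1 : k = "TimeStamp"
    · subst h1
      have h0 : (rest.map Prod.fst).count "TimeStamp" = 0 := by
        simp at h; omega
      have hnot : "TimeStamp" ∉ rest.map Prod.fst := List.count_eq_zero.mp h0
      have hstep : ilStepItems (link, ts) ("TimeStamp", v) = (link.insert "TimeStamp" ts, v) := by
        simp [ilStepItems]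
      rw [List.foldl_cons, hstep, ih _ _ (by omega)]
      have hcongr : (rest.filter (fun p => ilKeep p.1)).foldl (ilStepB v) (link.insert "TimeStamp" ts)
          = (rest.filter (fun p => ilKeep p.1)).foldl (ilStepB ts) (link.insert "TimeStamp" ts) := by
        apply PySem.List.foldl_congr_mem
        intro acc q hq
        have hq' : q.1 ≠ "TimeStamp" := by
          intro hqe
          exact hnot (hqe ▸ List.mem_map_of_mem (List.mem_of_mem_filter hq))
        simp [ilStepB, hq']
      have hts : ilTsAfter rest v = v := by
        have : rest.find? (fun p => p.1 == "TimeStamp") = none := by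
          apply List.find?_eq_none.mpr
          intro q hq
          simp only [beq_iff_eq]
          intro hqe
          exact hnot (hqe ▸ List.mem_map_of_mem hq)
        simp [ilTsAfter, this]
      have hfilter : (("TimeStamp", v) :: rest).filter (fun p => ilKeep p.1)
          = ("TimeStamp", v) :: rest.filter (fun p => ilKeep p.1) := by
        simp [ilKeep]
      have hts2 : ilTsAfter (("TimeStamp", v) :: rest) ts = v := by
        simp [ilTsAfter]
      rw [hcongr, hts, hfilter, hts2, List.foldl_cons]
      have : ilStepB ts link ("TimeStamp", v) = link.insert "TimeStamp" ts := by simp [ilStepB]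
      rw [this]
    · have hcount : (rest.map Prod.fst).count "TimeStamp" ≤ 1 := by
        simp [h1] at h ⊢
        omega
      have hts3 : ilTsAfter ((k, v) :: rest) ts = ilTsAfter rest ts := by
        simp [ilTsAfter, h1]
      by_cases hK : ilKeep k = true
      · have hstep : ilStepItems (link, ts) (k, v) = (link.insert k v, ts) := by
          simp [ilStepItems, h1, hK]
        have hfilter : ((k, v) :: rest).filter (fun p => ilKeep p.1)
            = (k, v) :: rest.filter (fun p => ilKeep p.1) := by
          simp [hK]
        have hstepB : ilStepB ts link (k, v) = link.insert k v := by
          simp [ilStepB, h1]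
        rw [List.foldl_cons, hstep, ih _ _ hcount, hts3, hfilter, List.foldl_cons, hstepB]
      · have hstep : ilStepItems (link, ts) (k, v) = (link, ts) := by
          simp [ilStepItems, h1, hK]
        have hfilter : ((k, v) :: rest).filter (fun p => ilKeep p.1)
            = rest.filter (fun p => ilKeep p.1) := by
          simp [hK]
        rw [List.foldl_cons, hstep, ih _ _ hcount, hts3, hfilter]

theorem ilTsAfter_eq (its : List (String × String)) (ts : String) :
    ilTsAfter its ts = ((PySem.Dict.mk its).get? "TimeStamp").getD ts := by
  induction its with
  | nil => rfl
  | cons p rest ih =>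
    obtain ⟨k, v⟩ := p
    rw [PySem.Dict.get?_mk_cons]
    by_cases h : k = "TimeStamp"
    · subst h; simp [ilTsAfter]
    · have hb : (k == "TimeStamp") = false := by simp [h]
      simp only [ilTsAfter, List.find?_cons, hb] at *
      rw [if_neg (by simp)]
      exact ih

theorem ilfoldE_none (cd : PySem.Dict String String) (ks : List String)
    (st : PySem.Dict String String × String) (h : "TimeStamp" ∉ ks) :
    ks.foldl (ilStepE cd) st = st := by
  induction ks generalizing st with
  | nil => rfl
  | cons k rest ih =>
    have hk : k ≠ "TimeStamp" := fun he => h (he ▸ List.mem_cons_self)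
    rw [List.foldl_cons, show ilStepE cd st k = st by simp [ilStepE, hk]]
    exact ih _ (fun hm => h (List.mem_cons_of_mem _ hm))

theorem ilfoldE_eq (cd : PySem.Dict String String) (ks : List String)
    (st : PySem.Dict String String × String) (h : ks.count "TimeStamp" ≤ 1) :
    ks.foldl (ilStepE cd) st
      = if "TimeStamp" ∈ ks then (st.1.insert "TimeStamp" st.2, cd.getD "TimeStamp" st.2) else st := by
  induction ks generalizing st with
  | nil => simp
  | cons k rest ih =>
    by_cases hk : k = "TimeStamp"
    · subst hk
      have h0 : rest.count "TimeStamp" = 0 := by simp at h; omega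
      have hnot : "TimeStamp" ∉ rest := List.count_eq_zero.mp h0
      rw [List.foldl_cons, show ilStepE cd st "TimeStamp"
          = (st.1.insert "TimeStamp" st.2, cd.getD "TimeStamp" st.2) by simp [ilStepE],
        ilfoldE_none cd rest _ hnot]
      simp
    · have hcount : rest.count "TimeStamp" ≤ 1 := by
        simp [hk] at h ⊢; omega
      rw [List.foldl_cons, show ilStepE cd st k = st by simp [ilStepE, hk], ih _ hcount]
      by_cases hm : "TimeStamp" ∈ rest
      · rw [if_pos hm, if_pos (List.mem_cons_of_mem _ hm)]
      · have hnm : "TimeStamp" ∉ k :: rest := by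
          intro hmem
          rcases List.mem_cons.mp hmem with he | hm2
          · exact hk he.symm
          · exact hm hm2
        rw [if_neg hm, if_neg hnm]

-- B's recursive builder IS the substituted filter of the items
theorem ilBuild_eq (its : List (String × String)) (ts : String) :
    ilBuild its ts
      = (its.filter (fun p => ilKeep p.1)).map
          (fun p => (p.1, if p.1 == "TimeStamp" then ts else p.2)) := by
  induction its with
  | nil => rfl
  | cons p rest ih =>
    obtain ⟨k, v⟩ := p
    by_cases hK : ilKeep k = true
    · simp [ilBuild, hK, ih]
    · simp [ilBuild, hK, ih]

-- building a dict from a list with distinct keys keeps the list as its items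
theorem items_ofList_nodup (l : List (String × String)) (h : (l.map Prod.fst).Nodup) :
    (PySem.Dict.ofList l).items = l := by
  have := PySem.Dict.items_foldl_insert_fresh (d := (PySem.Dict.empty : PySem.Dict String String))
    (l := l) (k := Prod.fst) (v := Prod.snd) (by simp) h
  simpa [PySem.Dict.ofList] using this

-- a foldl of dict-inserts over distinct keys fresh for the start dict produces exactly that pair list
theorem items_foldl_stepB (fl : List (String × String)) (ct ts : String)
    (hnd : (fl.map Prod.fst).Nodup) (hty : "Type" ∉ fl.map Prod.fst) :
    (fl.foldl (ilStepB ts) (PySem.Dict.empty.insert "Type" ct)).items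
      = ("Type", ct) :: fl.map (fun p => (p.1, if p.1 == "TimeStamp" then ts else p.2)) := by
  have hfresh : ∀ p ∈ fl, (PySem.Dict.empty.insert "Type" ct).contains p.1 = false := by
    intro p hp
    have hne : p.1 ≠ "Type" := fun he => hty (he ▸ List.mem_map_of_mem hp)
    simp [PySem.Dict.contains_insert, hne]
  have := PySem.Dict.items_foldl_insert_fresh
    (d := PySem.Dict.empty.insert "Type" ct) (l := fl) (k := Prod.fst)
    (v := fun p => if p.1 == "TimeStamp" then ts else p.2) hfresh hnd
  have hb : fl.foldl (ilStepB ts) (PySem.Dict.empty.insert "Type" ct)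
      = fl.foldl (fun d p => d.insert p.1 (if p.1 == "TimeStamp" then ts else p.2))
          (PySem.Dict.empty.insert "Type" ct) := rfl
  rw [hb, this]
  rfl

-- ===== VERDICT (by name: the statement is the Claim_ definition above) =====
theorem Identify_Link_spec : Claim_equal_Identify_Link := by
  intro raw_list i last_dict current_dict current_type last_timestamp _ _
  unfold Spec_Identify_Link Identify_Link Identify_Link_alt
  by_cases hW : (PySem.Dict.ofList current_dict).contains "Widget" = true
  · simp only [hW, if_true]
    set cd := PySem.Dict.ofList current_dict with hcd
    have hnd : cd.keys.Nodup := PySem.Dict.nodup_keys_ofList current_dict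
    have hcount : (cd.items.map Prod.fst).count "TimeStamp" ≤ 1 :=
      (List.nodup_iff_count_le_one.mp hnd) "TimeStamp"
    rw [ilfoldA_keys_items _ _ hnd, ilfold_items _ _ _ hcount]
    have hfnd : ((cd.items.filter (fun p => ilKeep p.1)).map Prod.fst).Nodup :=
      hnd.sublist ((List.filter_sublist (l := cd.items)).map Prod.fst)
    have hty : "Type" ∉ (cd.items.filter (fun p => ilKeep p.1)).map Prod.fst := by
      intro hm
      rcases List.mem_map.mp hm with ⟨p, hp, hpe⟩
      have := List.of_mem_filter hp
      rw [hpe] at this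
      simp [ilKeep] at this
    have hndcons : ((("Type", current_type) ::
        ilBuild cd.items last_timestamp).map Prod.fst).Nodup := by
      rw [ilBuild_eq, List.map_cons, List.nodup_cons, List.map_map]
      constructor
      · intro hm
        apply hty
        simpa using hm
      · simpa using hfnd
    refine Prod.ext ?_ ?_
    · rw [items_foldl_stepB _ _ _ hfnd hty, items_ofList_nodup _ hndcons, ilBuild_eq]
    · rw [ilTsAfter_eq, show PySem.Dict.mk cd.items = cd from rfl, PySem.Dict.getD_eq_get?_getD]
  · simp only [Bool.not_eq_true] at hW
    simp only [hW, Bool.false_eq_true, if_false]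
    have hnd : (PySem.Dict.ofList last_dict).keys.Nodup :=
      PySem.Dict.nodup_keys_ofList last_dict
    have hcount : (PySem.Dict.ofList last_dict).keys.count "TimeStamp" ≤ 1 :=
      (List.nodup_iff_count_le_one.mp hnd) "TimeStamp"
    rw [ilfoldE_eq _ _ _ hcount]
    by_cases hT : "TimeStamp" ∈ (PySem.Dict.ofList last_dict).keys
    · have hc : (PySem.Dict.ofList last_dict).contains "TimeStamp" = true :=
        (PySem.Dict.contains_iff_mem_keys _ _).mpr hT
      rw [if_pos hT, hc]
      simp
      rfl
    · have hc : (PySem.Dict.ofList last_dict).contains "TimeStamp" = false := by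
        rw [← Bool.not_eq_true]
        exact fun hcc => hT ((PySem.Dict.contains_iff_mem_keys _ _).mp hcc)
      rw [if_neg hT, hc]
      simp
      rfl
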